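-- pv_equiv track=rewrite | github.com/eppenga/Sunflow-Deribit | preload.py | combine_prices
-- ===== SOURCE A (Python) =====
-- def combine_prices(prices_1, prices_2):
--
--     # Combine and sort by 'time'
--     prices = sorted(zip(prices_1['time'] + prices_2['time'], prices_1['price'] + prices_2['price']))
--
--     # Use a dictionary to remove duplicates, keeping the first occurrence of each 'time'
--     unique_prices = {}
--     for t, p in prices:
--         if t not in unique_prices:
--             unique_prices[t] = p
--
--     # Separate into 'time' and 'price' lists
--     combined_prices = {
--         'time': list(unique_prices.keys()),
--         'price': list(unique_prices.values())
--     }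
--
--     # Return combined list
--     return combined_prices
-- ===== SOURCE B (Python) =====
-- def combine_prices(prices_1, prices_2):
--     # One pass: map each time to the minimum price seen for it, then sort the
--     # reduced table by time and split into the two columns.
--     best = {}
--     for t, p in zip(prices_1['time'] + prices_2['time'],
--                     prices_1['price'] + prices_2['price']):
--         if t not in best or p < best[t]:
--             best[t] = p
--     items = sorted(best.items())
--     return {'time': [t for t, _ in items], 'price': [p for _, p in items]}
-- ===== Notes on version B (the rewrite author's own statement) =====
-- stated objective: alternative
-- what changed: B replaces A's sort-everything-then-keep-first-occurrence pass by a single unsorted scan that keeps the minimum price per time in a dict, then sorts only the reduced per-time table; the full sort of all n points becomes a sort of only the k distinct times.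
import Mathlib
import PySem

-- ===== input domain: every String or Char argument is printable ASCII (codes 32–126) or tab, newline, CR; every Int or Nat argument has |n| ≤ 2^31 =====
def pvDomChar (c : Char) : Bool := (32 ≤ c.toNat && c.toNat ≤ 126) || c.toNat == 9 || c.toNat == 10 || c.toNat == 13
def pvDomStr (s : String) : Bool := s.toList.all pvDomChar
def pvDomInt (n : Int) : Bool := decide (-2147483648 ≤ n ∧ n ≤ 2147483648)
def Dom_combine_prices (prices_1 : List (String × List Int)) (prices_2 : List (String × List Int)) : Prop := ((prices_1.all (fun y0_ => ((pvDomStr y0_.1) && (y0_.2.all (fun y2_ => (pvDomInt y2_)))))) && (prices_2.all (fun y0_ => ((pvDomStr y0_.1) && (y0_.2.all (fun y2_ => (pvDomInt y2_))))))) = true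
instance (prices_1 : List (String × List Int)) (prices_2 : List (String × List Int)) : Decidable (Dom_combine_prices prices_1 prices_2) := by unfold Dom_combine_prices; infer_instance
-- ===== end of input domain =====

-- B replaces A's sort-all-points-then-keep-first-occurrence pass by one unsorted scan keeping the
-- minimum price per time in a dict, then sorts only the reduced per-time table (alternative decomposition).

-- ===== PORT A =====
-- A's 'prices_1["time"]' etc.: first-match association-list lookup; none = Python KeyError (excluded by Pre_, both ports return [] there).
def combine_prices (prices_1 : List (String × List Int)) (prices_2 : List (String × List Int)) : List (String × List Int) :=
  match (PySem.Dict.mk prices_1).get? "time", (PySem.Dict.mk prices_1).get? "price",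
        (PySem.Dict.mk prices_2).get? "time", (PySem.Dict.mk prices_2).get? "price" with
  | some t1, some p1, some t2, some p2 =>
      -- prices = sorted(zip(prices_1['time'] + prices_2['time'], prices_1['price'] + prices_2['price']))
      let prices := PySem.List.sorted2 ((t1 ++ t2).zip (p1 ++ p2)) Prod.fst Prod.snd
      -- for t, p in prices: if t not in unique_prices: unique_prices[t] = p
      let unique_prices := prices.foldl
        (fun d tp => if d.contains tp.1 then d else d.insert tp.1 tp.2) PySem.Dict.empty
      [("time", unique_prices.keys), ("price", unique_prices.values)]
  | _, _, _, _ => []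

-- ===== PORT B =====
def combine_prices_alt (prices_1 : List (String × List Int)) (prices_2 : List (String × List Int)) : List (String × List Int) :=
  match (PySem.Dict.mk prices_1).get? "time" with
  | none => []
  | some t1 =>
  match (PySem.Dict.mk prices_1).get? "price" with
  | none => []
  | some p1 =>
  match (PySem.Dict.mk prices_2).get? "time" with
  | none => []
  | some t2 =>
  match (PySem.Dict.mk prices_2).get? "price" with
  | none => []
  | some p2 =>
      -- for t, p in zip(...): if t not in best or p < best[t]: best[t] = p
      -- ('p < best[t]' is only reached when t is a key, so getD with any default is exact)
      let best := ((t1 ++ t2).zip (p1 ++ p2)).foldl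
        (fun d tp => if !d.contains tp.1 || decide (tp.2 < d.getD tp.1 0) then d.insert tp.1 tp.2 else d)
        PySem.Dict.empty
      -- items = sorted(best.items())
      let items := PySem.List.sorted2 best.items Prod.fst Prod.snd
      [("time", items.map Prod.fst), ("price", items.map Prod.snd)]

-- ===== PRECONDITION & SPEC =====
-- Pre_ excludes exactly the inputs where Python A raises KeyError: a 'time' or 'price' key missing
-- from either argument dict.
def Pre_combine_prices (prices_1 : List (String × List Int)) (prices_2 : List (String × List Int)) : Prop :=
  ((PySem.Dict.mk prices_1).get? "time").isSome = true ∧ ((PySem.Dict.mk prices_1).get? "price").isSome = true ∧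
  ((PySem.Dict.mk prices_2).get? "time").isSome = true ∧ ((PySem.Dict.mk prices_2).get? "price").isSome = true
instance (prices_1 : List (String × List Int)) (prices_2 : List (String × List Int)) : Decidable (Pre_combine_prices prices_1 prices_2) := by unfold Pre_combine_prices; infer_instance
def pvWitness_combine_prices : (List (String × List Int)) × (List (String × List Int)) :=
  ([("time", [3, 1, 3]), ("price", [7, 5, 4])], [("time", [2]), ("price", [6])])

def Spec_combine_prices (prices_1 : List (String × List Int)) (prices_2 : List (String × List Int)) (out : List (String × List Int)) : Prop := out = combine_prices_alt prices_1 prices_2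
instance (prices_1 : List (String × List Int)) (prices_2 : List (String × List Int)) (out : List (String × List Int)) : Decidable (Spec_combine_prices prices_1 prices_2 out) := by unfold Spec_combine_prices; infer_instance

-- ===== CLAIM (what is proved, stated in full; the proofs are below) =====
def Claim_equal_combine_prices : Prop := ∀ (prices_1 : List (String × List Int)) (prices_2 : List (String × List Int)), Dom_combine_prices prices_1 prices_2 → Pre_combine_prices prices_1 prices_2 → Spec_combine_prices prices_1 prices_2 (combine_prices prices_1 prices_2)

-- ===== LEMMAS AND PROOFS =====

-- the lexicographic key Python's tuple sort uses
def lexKey (x : Int × Int) : Lex (Int × Int) := toLex x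

-- proof-side helper: keep the first pair for each not-yet-seen key, threading the seen-key list
def firstOcc (seen : List Int) : List (Int × Int) → List (Int × Int)
  | [] => []
  | x :: r => if x.1 ∈ seen then firstOcc seen r else x :: firstOcc (seen ++ [x.1]) r

-- proof-side helper: the second component of the first pair with first component t
def firstVal : List (Int × Int) → Int → Option Int
  | [], _ => none
  | x :: r, t => if x.1 = t then some x.2 else firstVal r t

-- proof-side helper: running minimum of a list of prices, starting from an optional current best
def foldOptMin (o : Option Int) (vs : List Int) : Option Int :=
  vs.foldl (fun o v => match o with
    | none => some v
    | some w => if v < w then some v else some w) o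

theorem sorted2_eq_sorted_lex (xs : List (Int × Int)) :
    PySem.List.sorted2 xs Prod.fst Prod.snd false = PySem.List.sorted xs lexKey false := by
  simp only [PySem.List.sorted2, PySem.List.sorted]
  have h : (fun a b : Int × Int => decide (a.1 < b.1) || (!decide (b.1 < a.1) && decide (a.2 < b.2)))
      = fun a b : Int × Int => decide (lexKey a < lexKey b) := by
    funext a b
    simp only [lexKey, Prod.Lex.toLex_lt_toLex]
    by_cases h1 : a.1 < b.1 <;> by_cases h2 : b.1 < a.1 <;> by_cases h3 : a.2 < b.2 <;>
      simp [h1, h2, h3] <;> omega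
  rw [if_neg (by simp), if_neg (by simp), h]

theorem dedup_fold_items (xs : List (Int × Int)) (d : PySem.Dict Int Int) :
    (xs.foldl (fun d tp => if d.contains tp.1 then d else d.insert tp.1 tp.2) d).items
      = d.items ++ firstOcc d.keys xs := by
  induction xs generalizing d with
  | nil => simp [firstOcc]
  | cons x r ih =>
    simp only [List.foldl_cons, firstOcc]
    by_cases hc : d.contains x.1 = true
    · rw [if_pos hc, if_pos ((PySem.Dict.contains_iff_mem_keys d x.1).mp hc), ih]
    · have hm : x.1 ∉ d.keys := fun hm => hc ((PySem.Dict.contains_iff_mem_keys d x.1).mpr hm)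
      rw [if_neg hc, if_neg hm, ih]
      rw [PySem.Dict.items_insert_of_not_contains d x.2 (by simpa using hc),
          PySem.Dict.keys_insert_of_not_contains d x.2 (by simpa using hc)]
      simp

theorem firstOcc_sublist (seen : List Int) (xs : List (Int × Int)) :
    (firstOcc seen xs).Sublist xs := by
  induction xs generalizing seen with
  | nil => simp [firstOcc]
  | cons x r ih =>
    simp only [firstOcc]
    split
    · exact (ih seen).cons x
    · exact (ih (seen ++ [x.1])).cons₂ x

theorem firstOcc_keys_fresh (seen : List Int) (xs : List (Int × Int)) :
    ∀ k ∈ (firstOcc seen xs).map Prod.fst, k ∉ seen := by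
  induction xs generalizing seen with
  | nil => simp [firstOcc]
  | cons x r ih =>
    simp only [firstOcc]
    split
    · exact ih seen
    · rename_i hx
      intro k hk
      simp only [List.map_cons, List.mem_cons] at hk
      rcases hk with rfl | hk
      · exact hx
      · have := ih (seen ++ [x.1]) k hk
        intro hc; exact this (by simp [hc])

theorem firstOcc_keys_nodup (seen : List Int) (xs : List (Int × Int)) :
    ((firstOcc seen xs).map Prod.fst).Nodup := by
  induction xs generalizing seen with
  | nil => simp [firstOcc]
  | cons x r ih =>
    simp only [firstOcc]
    split
    · exact ih seen
    · simp only [List.map_cons, List.nodup_cons]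
      refine ⟨fun hc => ?_, ih _⟩
      exact firstOcc_keys_fresh (seen ++ [x.1]) r x.1 hc (by simp)

theorem mem_firstOcc (seen : List Int) (xs : List (Int × Int)) (t p : Int) :
    (t, p) ∈ firstOcc seen xs ↔ t ∉ seen ∧ firstVal xs t = some p := by
  induction xs generalizing seen with
  | nil => simp [firstOcc, firstVal]
  | cons x r ih =>
    simp only [firstOcc, firstVal]
    split
    · rename_i hx
      rw [ih seen]
      by_cases ht : x.1 = t
      · subst ht; simp [hx]
      · simp [ht]
    · rename_i hx
      simp only [List.mem_cons, ih (seen ++ [x.1])]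
      by_cases ht : x.1 = t
      · subst ht
        simp only [if_pos rfl]
        constructor
        · rintro (h | ⟨hns, _⟩)
          · refine ⟨hx, ?_⟩
            rw [← h]; simp
          · exact absurd (by simp : x.1 ∈ seen ++ [x.1]) hns
        · rintro ⟨hns, hp⟩
          left
          have hpe : p = x.2 := by injection hp.symm
          rw [hpe]
      · simp only [if_neg ht]
        constructor
        · rintro (h | ⟨hns, hv⟩)
          · exact absurd (congrArg Prod.fst h).symm ht
          · exact ⟨fun hc => hns (by simp [hc]), hv⟩
        · rintro ⟨hns, hv⟩
          right
          refine ⟨?_, hv⟩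
          simp only [List.mem_append, List.mem_singleton]
          rintro (hc | hc)
          · exact hns hc
          · exact ht hc.symm

theorem min_fold_get? (xs : List (Int × Int)) (d : PySem.Dict Int Int) (t : Int) :
    (xs.foldl (fun d tp => if !d.contains tp.1 || decide (tp.2 < d.getD tp.1 0) then d.insert tp.1 tp.2 else d) d).get? t
      = foldOptMin (d.get? t) ((xs.filter (fun x => x.1 == t)).map Prod.snd) := by
  induction xs generalizing d with
  | nil => simp [foldOptMin]
  | cons x r ih =>
    simp only [List.foldl_cons, List.filter_cons]
    by_cases ht : x.1 = t
    · subst ht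
      simp only [beq_self_eq_true, if_pos, List.map_cons]
      rw [show ∀ o l, foldOptMin o (x.2 :: l) = foldOptMin ((fun o v => match o with
            | none => some v
            | some w => if v < w then some v else some w) o x.2) l from fun _ _ => rfl]
      cases hg : d.get? x.1 with
      | none =>
        have hc : d.contains x.1 = false := by
          rw [PySem.Dict.contains_eq_isSome_get?, hg]; rfl
        rw [hc]
        simp only [Bool.not_false, Bool.true_or, if_pos]
        rw [ih, PySem.Dict.get?_insert_self]
      | some w =>
        have hc : d.contains x.1 = true := by
          rw [PySem.Dict.contains_eq_isSome_get?, hg]; rfl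
        have hgd : d.getD x.1 0 = w := PySem.Dict.getD_of_get?_eq_some d 0 hg
        rw [hc, hgd]
        simp only [Bool.not_true, Bool.false_or]
        by_cases hv : x.2 < w
        · rw [if_pos (by simpa using hv), if_pos hv, ih, PySem.Dict.get?_insert_self]
        · rw [if_neg (by simpa using hv), if_neg hv, ih, hg]
    · have hbeq : (x.1 == t) = false := by simpa using ht
      rw [hbeq]
      simp only [Bool.false_eq_true, ite_false]
      split
      · rw [ih, PySem.Dict.get?_insert_of_ne d x.2 (fun h => ht h.symm)]
      · exact ih d

theorem min_fold_nodup (xs : List (Int × Int)) (d : PySem.Dict Int Int) (hd : d.keys.Nodup) :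
    (xs.foldl (fun d tp => if !d.contains tp.1 || decide (tp.2 < d.getD tp.1 0) then d.insert tp.1 tp.2 else d) d).keys.Nodup := by
  induction xs generalizing d with
  | nil => simpa
  | cons x r ih =>
    simp only [List.foldl_cons]
    split
    · exact ih _ (PySem.Dict.nodup_keys_insert _ _ _ hd)
    · exact ih _ hd

theorem foldOptMin_none_eq_none (vs : List Int) : foldOptMin none vs = none ↔ vs = [] := by
  cases vs with
  | nil => simp [foldOptMin]
  | cons v r =>
    simp only [foldOptMin, List.foldl_cons, iff_false, reduceCtorEq]
    suffices h : ∀ (o : Option Int) (w : Int) (l : List Int), l.foldl (fun o v => match o with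
      | none => some v
      | some w => if v < w then some v else some w) (some w) ≠ none by
      exact by simp_all
    intro o w l
    induction l generalizing w with
    | nil => simp
    | cons a l ih => simp only [List.foldl_cons]; split <;> apply ih

theorem foldOptMin_some_spec (vs : List Int) (w p : Int)
    (h : foldOptMin (some w) vs = some p) :
    (p = w ∨ p ∈ vs) ∧ (∀ q ∈ vs, p ≤ q) ∧ p ≤ w := by
  induction vs generalizing w with
  | nil =>
    simp only [foldOptMin, List.foldl_nil, Option.some.injEq] at h
    simp [h]
  | cons v r ih =>
    simp only [foldOptMin, List.foldl_cons] at h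
    by_cases hv : v < w
    · rw [if_pos hv] at h
      obtain ⟨hm, hle, hw⟩ := ih v h
      refine ⟨?_, ?_, le_trans hw (le_of_lt hv)⟩
      · right
        rcases hm with rfl | hm
        · exact List.mem_cons_self
        · exact List.mem_cons_of_mem _ hm
      · intro q hq
        rcases List.mem_cons.mp hq with rfl | hq
        · exact hw
        · exact hle q hq
    · rw [if_neg hv] at h
      obtain ⟨hm, hle, hw⟩ := ih w h
      refine ⟨?_, ?_, hw⟩
      · rcases hm with rfl | hm
        · exact Or.inl rfl
        · exact Or.inr (List.mem_cons_of_mem _ hm)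
      · intro q hq
        rcases List.mem_cons.mp hq with rfl | hq
        · exact le_trans hw (not_lt.mp hv)
        · exact hle q hq

theorem foldOptMin_spec (vs : List Int) (p : Int) (h : foldOptMin none vs = some p) :
    p ∈ vs ∧ ∀ q ∈ vs, p ≤ q := by
  cases vs with
  | nil => simp [foldOptMin] at h
  | cons v r =>
    simp only [foldOptMin, List.foldl_cons] at h
    obtain ⟨hm, hle, hw⟩ := foldOptMin_some_spec r v p h
    refine ⟨?_, ?_⟩
    · rcases hm with rfl | hm
      · exact List.mem_cons_self
      · exact List.mem_cons_of_mem _ hm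
    · intro q hq
      rcases List.mem_cons.mp hq with rfl | hq
      · exact hw
      · exact hle q hq

theorem firstVal_none_iff (xs : List (Int × Int)) (t : Int) :
    firstVal xs t = none ↔ ∀ p, (t, p) ∉ xs := by
  induction xs with
  | nil => simp [firstVal]
  | cons x r ih =>
    simp only [firstVal]
    by_cases ht : x.1 = t
    · subst ht
      simp only [if_pos trivial, reduceCtorEq, false_iff, not_forall, not_not]
      exact ⟨x.2, List.mem_cons_self⟩
    · simp only [if_neg ht, ih]
      constructor
      · intro h p hp
        rcases List.mem_cons.mp hp with h' | h'
        · exact ht (congrArg Prod.fst h').symm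
        · exact h p h'
      · intro h p hp
        exact h p (List.mem_cons_of_mem _ hp)

theorem firstVal_spec (xs : List (Int × Int)) (t p : Int)
    (hs : xs.Pairwise (fun a b => lexKey a ≤ lexKey b)) (h : firstVal xs t = some p) :
    (t, p) ∈ xs ∧ ∀ q, (t, q) ∈ xs → p ≤ q := by
  induction xs with
  | nil => simp [firstVal] at h
  | cons x r ih =>
    rw [List.pairwise_cons] at hs
    simp only [firstVal] at h
    by_cases ht : x.1 = t
    · subst ht
      have hp : p = x.2 := by simp at h; omega
      subst hp
      refine ⟨List.mem_cons_self, ?_⟩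
      intro q hq
      rcases List.mem_cons.mp hq with h' | h'
      · exact le_of_eq (congrArg Prod.snd h'.symm)
      · have hlex := hs.1 (x.1, q) h'
        rw [lexKey, lexKey, Prod.Lex.toLex_le_toLex] at hlex
        rcases hlex with h1 | ⟨_, h2⟩
        · exact absurd h1 (lt_irrefl _)
        · exact h2
    · rw [if_neg ht] at h
      obtain ⟨hm, hle⟩ := ih hs.2 h
      refine ⟨List.mem_cons_of_mem _ hm, ?_⟩
      intro q hq
      rcases List.mem_cons.mp hq with h' | h'
      · exact absurd (congrArg Prod.fst h').symm ht
      · exact hle q h'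

theorem mem_vals (L : List (Int × Int)) (t p : Int) :
    p ∈ (L.filter (fun x => x.1 == t)).map Prod.snd ↔ (t, p) ∈ L := by
  simp only [List.mem_map, List.mem_filter, beq_iff_eq]
  constructor
  · rintro ⟨y, ⟨hy, ht⟩, hp⟩
    have : y = (t, p) := Prod.ext ht hp
    exact this ▸ hy
  · intro h
    exact ⟨(t, p), ⟨h, rfl⟩, rfl⟩

theorem firstVal_sorted_eq_min (L : List (Int × Int)) (t : Int) :
    firstVal (PySem.List.sorted L lexKey false) t
      = foldOptMin none ((L.filter (fun x => x.1 == t)).map Prod.snd) := by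
  have hperm : (PySem.List.sorted L lexKey false).Perm L := PySem.List.sorted_perm L lexKey false
  cases hf : firstVal (PySem.List.sorted L lexKey false) t with
  | none =>
    have hall := (firstVal_none_iff _ t).mp hf
    have hnil : (L.filter (fun x => x.1 == t)).map Prod.snd = [] := by
      rw [List.map_eq_nil_iff, List.filter_eq_nil_iff]
      intro y hy hbeq
      have hyt : y = (t, y.2) := Prod.ext (by simpa using hbeq) rfl
      exact hall y.2 (hperm.mem_iff.mpr (hyt ▸ hy))
    rw [hnil]
    rfl
  | some p =>
    obtain ⟨hmem, hmin⟩ := firstVal_spec _ t p (PySem.List.sorted_pairwise L lexKey) hf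
    have hpv : p ∈ (L.filter (fun x => x.1 == t)).map Prod.snd :=
      (mem_vals L t p).mpr (hperm.mem_iff.mp hmem)
    cases hm : foldOptMin none ((L.filter (fun x => x.1 == t)).map Prod.snd) with
    | none =>
      rw [foldOptMin_none_eq_none] at hm
      rw [hm] at hpv
      exact absurd hpv (List.not_mem_nil)
    | some q =>
      obtain ⟨hqv, hqmin⟩ := foldOptMin_spec _ q hm
      have h1 : p ≤ q := hmin q (hperm.mem_iff.mpr ((mem_vals L t q).mp hqv))
      have h2 : q ≤ p := hqmin p hpv
      rw [le_antisymm h1 h2]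

-- the central fact: first-per-time of the lex-sorted points = the min-per-time dict, as a sorted table
theorem main_eq (L : List (Int × Int)) :
    (PySem.List.sorted L lexKey false |>.foldl
        (fun d tp => if d.contains tp.1 then d else d.insert tp.1 tp.2) PySem.Dict.empty).items
      = PySem.List.sorted
          ((L.foldl (fun d tp => if !d.contains tp.1 || decide (tp.2 < d.getD tp.1 0) then d.insert tp.1 tp.2 else d) PySem.Dict.empty).items)
          lexKey false := by
  have hitems : ((PySem.List.sorted L lexKey false).foldl
      (fun d tp => if d.contains tp.1 then d else d.insert tp.1 tp.2) (PySem.Dict.empty : PySem.Dict Int Int)).items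
      = firstOcc [] (PySem.List.sorted L lexKey false) := by
    rw [dedup_fold_items]
    rfl
  rw [hitems]
  symm
  have hMnodup : (L.foldl (fun d tp => if !d.contains tp.1 || decide (tp.2 < d.getD tp.1 0) then d.insert tp.1 tp.2 else d) (PySem.Dict.empty : PySem.Dict Int Int)).keys.Nodup :=
    min_fold_nodup L _ (by simp [PySem.Dict.keys_empty])
  apply PySem.List.sorted_eq_of_perm_of_pairwise_lt
  · apply (List.perm_ext_iff_of_nodup ?_ ?_).mpr
    · rintro ⟨t, p⟩
      rw [mem_firstOcc, ← PySem.Dict.get?_eq_some_iff_mem_items _ t p hMnodup, min_fold_get?,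
          PySem.Dict.get?_empty, ← firstVal_sorted_eq_min]
      simp
    · exact List.Nodup.of_map Prod.fst (firstOcc_keys_nodup [] _)
    · have := hMnodup
      simp only [PySem.Dict.keys] at this
      exact List.Nodup.of_map _ this
  · have hle : (firstOcc [] (PySem.List.sorted L lexKey false)).Pairwise
        (fun a b => lexKey a ≤ lexKey b) :=
      (PySem.List.sorted_pairwise L lexKey).sublist (firstOcc_sublist [] _)
    have hne : (firstOcc [] (PySem.List.sorted L lexKey false)).Pairwise (fun a b => a.1 ≠ b.1) :=
      List.pairwise_map.mp (firstOcc_keys_nodup [] _)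
    exact (hle.and hne).imp (fun h =>
      lt_of_le_of_ne h.1 (fun he => h.2 (congrArg (fun z => (ofLex z).1) he)))

-- ===== VERDICT (by name: the statement is the Claim_ definition above) =====
theorem combine_prices_spec : Claim_equal_combine_prices := by
  intro prices_1 prices_2 _hdom hpre
  obtain ⟨h1, h2, h3, h4⟩ := hpre
  obtain ⟨t1, e1⟩ := Option.isSome_iff_exists.mp h1
  obtain ⟨p1, e2⟩ := Option.isSome_iff_exists.mp h2
  obtain ⟨t2, e3⟩ := Option.isSome_iff_exists.mp h3
  obtain ⟨p2, e4⟩ := Option.isSome_iff_exists.mp h4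
  show combine_prices prices_1 prices_2 = combine_prices_alt prices_1 prices_2
  unfold combine_prices combine_prices_alt
  rw [e1, e2, e3, e4]
  simp only [sorted2_eq_sorted_lex, PySem.Dict.keys, PySem.Dict.values, ← main_eq ((t1 ++ t2).zip (p1 ++ p2))]
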